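-- pv_equiv track=rewrite | github.com/yfelekis/COTA | abstraction_metrics.py | map_wdist
-- ===== SOURCE A (Python) =====
-- def map_wdist(m1, m2, important_keys=None):
--     distance = 0
--     common_keys = set(m1.keys()) & set(m2.keys())
--
--     for key in common_keys:
--         if m1[key] != m2[key]:
--             if important_keys and key in important_keys:
--                 distance += 2  # Increase the distance by 2 for important keys
--             else:
--                 distance += 1
--
--     return distance
-- ===== SOURCE B (Python) =====
-- def map_wdist(m1, m2, important_keys=None):
--     # Set-algebraic formulation: no per-key value comparison at all.
--     # A key contributes iff it is shared but its (key, value) pair is not shared,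
--     # and contributes once more if it is important.
--     common = m1.keys() & m2.keys()
--     same = {k for k, _ in m1.items() & m2.items()}
--     imp = set(important_keys) if important_keys else set()
--     return len(common) - len(same) + len(common & imp) - len(same & imp)
-- ===== Notes on version B (the rewrite author's own statement) =====
-- stated objective: alternative
-- what changed: Replaces A's per-key value-comparison loop with if/else weighting by pure set algebra: equal pairs are found as the intersection of the two item sets, and the weighted distance is computed by inclusion-exclusion as (|common|-|same|)+(|common&imp|-|same&imp|), with no value comparison and no accumulator loop.
import Mathlib
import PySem

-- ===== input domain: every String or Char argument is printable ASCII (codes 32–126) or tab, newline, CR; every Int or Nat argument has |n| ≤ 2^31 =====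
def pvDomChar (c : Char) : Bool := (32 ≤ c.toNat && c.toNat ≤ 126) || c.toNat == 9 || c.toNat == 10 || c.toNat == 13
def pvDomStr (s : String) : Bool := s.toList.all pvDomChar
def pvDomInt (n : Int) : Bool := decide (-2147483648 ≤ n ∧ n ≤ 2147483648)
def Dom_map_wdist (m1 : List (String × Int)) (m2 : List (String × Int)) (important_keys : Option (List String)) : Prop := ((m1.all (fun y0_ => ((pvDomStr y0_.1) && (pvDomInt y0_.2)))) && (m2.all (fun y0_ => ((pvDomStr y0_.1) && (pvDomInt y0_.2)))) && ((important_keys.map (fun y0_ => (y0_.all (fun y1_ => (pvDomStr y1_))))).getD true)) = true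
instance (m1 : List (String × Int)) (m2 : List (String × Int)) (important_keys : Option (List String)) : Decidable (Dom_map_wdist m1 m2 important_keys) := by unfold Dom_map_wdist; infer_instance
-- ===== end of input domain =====

-- B replaces A's per-key value-comparison loop (if/else weighting) by set algebra:
-- equal pairs come from the item-set intersection and the distance is
-- (|common| - |same|) + (|common ∩ imp| - |same ∩ imp|)  (objective: alternative, same cost).

-- ===== PORT A =====
def map_wdist (m1 : List (String × Int)) (m2 : List (String × Int)) (important_keys : Option (List String)) : Int :=
  let d1 := PySem.Dict.ofList m1
  let d2 := PySem.Dict.ofList m2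
  let common_keys := PySem.Set.inter (PySem.Set.ofList d1.keys) (PySem.Set.ofList d2.keys)
  -- `m1[key]` / `m2[key]`: key is in both dicts, so the lookup never raises; getD's default is unreachable
  common_keys.foldl (fun distance key =>
    if d1.getD key 0 ≠ d2.getD key 0 then
      if (match important_keys with
          | some ks => !ks.isEmpty && ks.contains key
          | none => false) then
        distance + 2
      else
        distance + 1
    else distance) 0

-- ===== PORT B =====
def map_wdist_alt (m1 : List (String × Int)) (m2 : List (String × Int)) (important_keys : Option (List String)) : Int :=
  let d1 := PySem.Dict.ofList m1
  let d2 := PySem.Dict.ofList m2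
  -- common = m1.keys() & m2.keys()
  let common := PySem.Set.inter (PySem.Set.ofList d1.keys) (PySem.Set.ofList d2.keys)
  -- same = {k for k, _ in m1.items() & m2.items()}  (a set built from the pair set; order never observed)
  let same : PySem.Set String :=
    PySem.Set.ofList
      ((PySem.Set.inter (PySem.Set.ofList d1.items) (PySem.Set.ofList d2.items)).map Prod.fst)
  -- imp = set(important_keys) if important_keys else set()
  let imp : PySem.Set String :=
    match important_keys with
    | some ks => if ks.isEmpty then PySem.Set.empty else PySem.Set.ofList ks
    | none => PySem.Set.empty
  ((PySem.Set.len common : Int) - (PySem.Set.len same : Int))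
    + ((PySem.Set.len (PySem.Set.inter common imp) : Int)
        - (PySem.Set.len (PySem.Set.inter same imp) : Int))

-- ===== PRECONDITION & SPEC =====
def Spec_map_wdist (m1 : List (String × Int)) (m2 : List (String × Int)) (important_keys : Option (List String)) (out : Int) : Prop := out = map_wdist_alt m1 m2 important_keys
instance (m1 : List (String × Int)) (m2 : List (String × Int)) (important_keys : Option (List String)) (out : Int) : Decidable (Spec_map_wdist m1 m2 important_keys out) := by unfold Spec_map_wdist; infer_instance

-- ===== CLAIM (what is proved, stated in full; the proofs are below) =====
def Claim_equal_map_wdist : Prop := ∀ (m1 : List (String × Int)) (m2 : List (String × Int)) (important_keys : Option (List String)), Dom_map_wdist m1 m2 important_keys → Spec_map_wdist m1 m2 important_keys (map_wdist m1 m2 important_keys)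

-- ===== LEMMAS AND PROOFS =====

-- A's accumulator loop counts differing keys once plus differing-important keys once more.
lemma wd_foldl (p q : String → Bool) (l : List String) (acc : Int) :
    l.foldl (fun d k => if p k then (if q k then d + 2 else d + 1) else d) acc
      = acc + ((l.filter p).length : Int) + (((l.filter p).filter q).length : Int) := by
  induction l generalizing acc with
  | nil => simp
  | cons x xs ih =>
    by_cases hp : p x <;> by_cases hq : q x <;>
      simp [List.foldl_cons, hp, hq, ih] <;> omega

-- key of a shared item pair ↔ common key with equal values
lemma wd_mem_same (m1 m2 : List (String × Int)) (k : String) :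
    (k ∈ ((PySem.Set.inter (PySem.Set.ofList (PySem.Dict.ofList m1).items)
            (PySem.Set.ofList (PySem.Dict.ofList m2).items)).map Prod.fst))
      ↔ (k ∈ PySem.Set.inter (PySem.Set.ofList (PySem.Dict.ofList m1).keys)
              (PySem.Set.ofList (PySem.Dict.ofList m2).keys)
          ∧ (PySem.Dict.ofList m1).getD k 0 = (PySem.Dict.ofList m2).getD k 0) := by
  have h1 := PySem.Dict.nodup_keys_ofList m1
  have h2 := PySem.Dict.nodup_keys_ofList m2
  constructor
  · rintro hk
    rcases List.mem_map.mp hk with ⟨⟨k', v⟩, hmem, rfl⟩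
    rcases (PySem.Set.mem_inter _ _ _).mp hmem with ⟨ha, hb⟩
    have ha' := (PySem.Set.mem_ofList _ _).mp ha
    have hb' := (PySem.Set.mem_ofList _ _).mp hb
    have g1 := PySem.Dict.get?_of_mem_items _ ha' h1
    have g2 := PySem.Dict.get?_of_mem_items _ hb' h2
    refine ⟨(PySem.Set.mem_inter _ _ _).mpr ⟨(PySem.Set.mem_ofList _ _).mpr ?_, (PySem.Set.mem_ofList _ _).mpr ?_⟩, ?_⟩
    · exact PySem.Dict.mem_keys_of_mem_items _ ha'
    · exact PySem.Dict.mem_keys_of_mem_items _ hb'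
    · simp [PySem.Dict.getD_eq_get?_getD, g1, g2]
  · rintro ⟨hk, hv⟩
    rcases (PySem.Set.mem_inter _ _ _).mp hk with ⟨ha, hb⟩
    have ha' := (PySem.Set.mem_ofList _ _).mp ha
    have hb' := (PySem.Set.mem_ofList _ _).mp hb
    rcases Option.isSome_iff_exists.mp (by
        rw [← PySem.Dict.contains_eq_isSome_get? (PySem.Dict.ofList m1) k]
        exact (PySem.Dict.contains_iff_mem_keys _ _).mpr ha') with ⟨v1, g1⟩
    rcases Option.isSome_iff_exists.mp (by
        rw [← PySem.Dict.contains_eq_isSome_get? (PySem.Dict.ofList m2) k]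
        exact (PySem.Dict.contains_iff_mem_keys _ _).mpr hb') with ⟨v2, g2⟩
    have hv12 : v1 = v2 := by
      rw [PySem.Dict.getD_eq_get?_getD, PySem.Dict.getD_eq_get?_getD, g1, g2] at hv
      simpa using hv
    subst hv12
    exact List.mem_map.mpr ⟨(k, v1),
      (PySem.Set.mem_inter _ _ _).mpr ⟨(PySem.Set.mem_ofList _ _).mpr (PySem.Dict.mem_items_of_get?_eq_some _ g1),
        (PySem.Set.mem_ofList _ _).mpr (PySem.Dict.mem_items_of_get?_eq_some _ g2)⟩, rfl⟩

-- A's truthiness test on important_keys equals membership in B's set imp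
lemma wd_imp (important_keys : Option (List String)) (k : String) :
    (match important_keys with
      | some ks => !ks.isEmpty && ks.contains k
      | none => false)
    = PySem.Set.contains (match important_keys with
        | some ks => if ks.isEmpty then PySem.Set.empty else PySem.Set.ofList ks
        | none => (PySem.Set.empty : PySem.Set String)) k := by
  cases important_keys with
  | none => simp [PySem.Set.empty, PySem.Set.contains]
  | some ks =>
    by_cases h : ks.isEmpty <;>
      simp [h, PySem.Set.empty, PySem.Set.contains, PySem.Set.mem_ofList]

-- ===== VERDICT (by name: the statement is the Claim_ definition above) =====
theorem map_wdist_spec : Claim_equal_map_wdist := by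
  intro m1 m2 important_keys hdom
  clear hdom
  unfold Spec_map_wdist map_wdist map_wdist_alt
  simp only []
  set d1 := PySem.Dict.ofList m1 with hd1
  set d2 := PySem.Dict.ofList m2 with hd2
  set C := PySem.Set.inter (PySem.Set.ofList d1.keys) (PySem.Set.ofList d2.keys) with hC
  set imp : PySem.Set String :=
    (match important_keys with
      | some ks => if ks.isEmpty then PySem.Set.empty else PySem.Set.ofList ks
      | none => (PySem.Set.empty : PySem.Set String)) with himp
  set same : PySem.Set String :=
    PySem.Set.ofList
      ((PySem.Set.inter (PySem.Set.ofList d1.items) (PySem.Set.ofList d2.items)).map Prod.fst)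
    with hsame
  set p : String → Bool := fun k => decide (d1.getD k 0 ≠ d2.getD k 0) with hp
  set q : String → Bool := fun k => PySem.Set.contains imp k with hq
  -- A's loop, rewritten to decidable tests
  have hA :
      List.foldl (fun (distance : Int) (key : String) =>
        if d1.getD key 0 ≠ d2.getD key 0 then
          if (match important_keys with
              | some ks => !ks.isEmpty && ks.contains key
              | none => false) then distance + 2 else distance + 1
        else distance) 0 C
      = 0 + ((C.filter p).length : Int) + (((C.filter p).filter q).length : Int) := by
    rw [← wd_foldl p q C 0]
    apply List.foldl_ext
    intro d k _
    rw [wd_imp important_keys k, ← himp]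
    simp [hp, hq, PySem.Set.contains]
  rw [hA]
  -- nodup facts
  have hCnd : C.Nodup :=
    PySem.Set.nodup_inter _ _ (PySem.Set.nodup_ofList _)
  have hsnd : same.Nodup := PySem.Set.nodup_ofList _
  -- same has the members of C.filter (¬ p)
  have hmem : ∀ k, k ∈ same ↔ k ∈ C.filter (fun k => !p k) := by
    intro k
    rw [hsame, PySem.Set.mem_ofList, wd_mem_same, List.mem_filter]
    simp [hp, hC, hd1, hd2]
  have hperm : same.Perm (C.filter (fun k => !p k)) :=
    (List.perm_ext_iff_of_nodup hsnd (hCnd.filter _)).mpr hmem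
  -- lengths
  have hlen1 : same.length = (C.filter (fun k => !p k)).length := hperm.length_eq
  have hlen2 : (PySem.Set.inter same imp).length
      = ((C.filter (fun k => !p k)).filter q).length := (hperm.filter _).length_eq
  have hsplitC : (C.filter p).length + (C.filter (fun k => !p k)).length = C.length :=
    (List.length_eq_length_filter_add p).symm
  have hsplitQ : ((C.filter q).filter p).length + ((C.filter q).filter (fun k => !p k)).length
      = (C.filter q).length :=
    (List.length_eq_length_filter_add p).symm
  have hcomm1 : (C.filter p).filter q = (C.filter q).filter p := List.filter_comm q p C
  have hcomm2 : (C.filter (fun k => !p k)).filter q = (C.filter q).filter (fun k => !p k) :=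
    List.filter_comm q _ C
  have hinterC : PySem.Set.inter C imp = C.filter q := rfl
  have hinterS : PySem.Set.inter same imp = same.filter q := rfl
  simp only [PySem.Set.len, hinterC, hlen1, hlen2, hcomm1, hcomm2]
  omega
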